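-- pv_equiv track=rewrite | github.com/GrumpyMetalGuy/AdventOfCode | Python/day6.py | redistributeBlocks
-- ===== SOURCE A (Python) =====
-- def redistributeBlocks(blocks):
--     stepCount = 0
--     seenBlocks = dict()
--
--     while True:
--         stepCount += 1
--
--         blockIndex = blocks.index(max(blocks))
--         currentBlockCount = blocks[blockIndex]
--         blocks[blockIndex] = 0
--
--         for blockOffset in range(1, currentBlockCount + 1):
--             blocks[(blockIndex + blockOffset) % len(blocks)] += 1
--
--         blockTuple = tuple(blocks)
--
--         if blockTuple in seenBlocks:
--             return stepCount - seenBlocks[blockTuple]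
--         else:
--             seenBlocks[blockTuple] = stepCount
-- ===== SOURCE B (Python) =====
-- def redistributeBlocks(blocks):
--     state = list(blocks)
--     n = len(state)
--     seen = dict()
--     steps = 0
--     while True:
--         steps += 1
--         m = max(state)
--         i = state.index(m)
--         state[i] = 0
--         if m > 0:
--             q, r = divmod(m, n)
--             if q:
--                 for j in range(n):
--                     state[j] += q
--             split = min(i + 1 + r, n)
--             for j in range(i + 1, split):
--                 state[j] += 1
--             for j in range(0, r - (split - i - 1)):
--                 state[j] += 1
--         key = tuple(state)
--         if key in seen:
--             return steps - seen[key]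
--         seen[key] = steps
-- ===== Notes on version B (the rewrite author's own statement) =====
-- stated objective: alternative
-- what changed: B distributes all m blocks of the chosen slot at once - add q = m//n to every slot when q is nonzero and +1 on the (at most two) contiguous wrapped runs of length r = m%n - instead of A's per-unit modular increment loop (O(n) per step instead of O(n+maxblock)), and keeps its own working copy instead of mutating the caller's list; total runtime is usually dominated by the shared step count S, so no overall speedup is claimed.
-- outside the precondition, e.g. on redistributeBlocks([]): A raises ValueError, B raises ValueError
import Mathlib
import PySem

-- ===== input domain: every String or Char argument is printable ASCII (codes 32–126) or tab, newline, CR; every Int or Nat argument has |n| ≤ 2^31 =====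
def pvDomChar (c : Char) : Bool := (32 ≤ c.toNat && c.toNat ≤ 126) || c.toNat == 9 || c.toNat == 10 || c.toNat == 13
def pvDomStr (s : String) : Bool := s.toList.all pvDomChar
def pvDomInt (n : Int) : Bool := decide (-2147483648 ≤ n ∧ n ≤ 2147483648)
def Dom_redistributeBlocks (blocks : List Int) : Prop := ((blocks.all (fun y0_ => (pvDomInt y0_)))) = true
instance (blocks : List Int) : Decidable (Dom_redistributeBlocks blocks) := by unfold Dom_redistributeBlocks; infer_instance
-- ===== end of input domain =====

-- B replaces A's per-unit inner redistribution loop by a divmod closed form per slot and finds the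
-- argmax in one explicit pass; A mutates its argument list in place, B does not — the equivalence
-- proved here is about the RETURN value only.

-- ===== PORT A =====
-- body of A's inner `for blockOffset in ...` loop: blocks[(blockIndex+blockOffset) % len(blocks)] += 1;
-- the index produced by % is in range for nonempty lists, so pyGetD/pySetD are exact there
def pvBump (blockIndex : Nat) (b : List Int) (off : Int) : List Int :=
  let k := PySem.Int.mod ((blockIndex : Int) + off) (PySem.List.len b)
  PySem.List.pySetD b k (PySem.List.pyGetD b k 0 + 1)

-- one iteration of A's while-loop body acting on `blocks` (mutation modelled as a new list)
def pvStepA (blocks : List Int) : List Int :=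
  let mx := (PySem.List.max? blocks (fun x => x)).getD 0
  let blockIndex : Nat := (PySem.List.index? blocks mx).getD 0
  let currentBlockCount := PySem.List.pyGetD blocks (blockIndex : Int) 0
  let b0 := PySem.List.pySetD blocks (blockIndex : Int) 0
  (PySem.List.pyRange 1 (currentBlockCount + 1) 1).foldl (pvBump blockIndex) b0

def pvLoopA : Nat → List Int → Int → PySem.Dict (List Int) Int → Int
  | 0, _, _, _ => 0
  | fuel+1, blocks, stepCount, seen =>
    let sc := stepCount + 1
    let b' := pvStepA blocks
    match seen.get? b' with
    | some prev => sc - prev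
    | none => pvLoopA fuel b' sc (seen.insert b' sc)

-- fuel only makes the unbounded `while True` total; it is never exhausted on terminating runs
def redistributeBlocks (blocks : List Int) : Int :=
  pvLoopA 4611686018427387904 blocks 0 PySem.Dict.empty

-- ===== PORT B =====
-- B's distribution: zero the chosen slot, add q = m // n to every slot when q != 0, then +1 on the
-- two contiguous wrapped runs of length r = m % n (closed form instead of A's per-unit loop)
def pvStepB (state : List Int) : List Int :=
  let n := PySem.List.len state
  let m := (PySem.List.max? state (fun x => x)).getD 0
  let i : Nat := (PySem.List.index? state m).getD 0
  let s0 := PySem.List.pySetD state (i : Int) 0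
  if m > 0 then
    let q := PySem.Int.floordiv m n
    let r := PySem.Int.mod m n
    let s1 := if q ≠ 0 then
        (PySem.List.pyRange 0 n 1).foldl
          (fun s2 j => PySem.List.pySetD s2 j (PySem.List.pyGetD s2 j 0 + q)) s0
      else s0
    let split := min ((i : Int) + 1 + r) n
    let s2 := (PySem.List.pyRange ((i : Int) + 1) split 1).foldl
        (fun s2 j => PySem.List.pySetD s2 j (PySem.List.pyGetD s2 j 0 + 1)) s1
    (PySem.List.pyRange 0 (r - (split - (i : Int) - 1)) 1).foldl
        (fun s2 j => PySem.List.pySetD s2 j (PySem.List.pyGetD s2 j 0 + 1)) s2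
  else s0

def pvLoopB : Nat → List Int → Int → PySem.Dict (List Int) Int → Int
  | 0, _, _, _ => 0
  | fuel+1, state, steps, seen =>
    let sc := steps + 1
    let s' := pvStepB state
    match seen.get? s' with
    | some prev => sc - prev
    | none => pvLoopB fuel s' sc (seen.insert s' sc)

def redistributeBlocks_alt (blocks : List Int) : Int :=
  pvLoopB 4611686018427387904 blocks 0 PySem.Dict.empty

-- ===== PRECONDITION & SPEC =====
-- Pre_ excludes only the empty list, on which A raises ValueError (max() of an empty sequence)
def Pre_redistributeBlocks (blocks : List Int) : Prop := blocks ≠ []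
instance (blocks : List Int) : Decidable (Pre_redistributeBlocks blocks) := by unfold Pre_redistributeBlocks; infer_instance

def pvWitness_redistributeBlocks : List Int := [0, 2, 7, 0]

def Spec_redistributeBlocks (blocks : List Int) (out : Int) : Prop := out = redistributeBlocks_alt blocks
instance (blocks : List Int) (out : Int) : Decidable (Spec_redistributeBlocks blocks out) := by unfold Spec_redistributeBlocks; infer_instance

-- ===== CLAIM (what is proved, stated in full; the proofs are below) =====
def Claim_equal_redistributeBlocks : Prop := ∀ (blocks : List Int), Dom_redistributeBlocks blocks → Pre_redistributeBlocks blocks → Spec_redistributeBlocks blocks (redistributeBlocks blocks)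

-- ===== LEMMAS AND PROOFS =====

theorem pvSubEmod (a c N : Int) : (a % N - c) % N = (a - c) % N := by
  rw [Int.sub_emod, Int.emod_emod_of_dvd a (dvd_refl N), ← Int.sub_emod]

theorem pvAddEmod (a c N : Int) : (a % N + c) % N = (a + c) % N := by
  rw [Int.add_emod, Int.emod_emod_of_dvd a (dvd_refl N), ← Int.add_emod]

theorem pvBumpIff (N i r j : Int) (_hN : 0 < N) (hj : 0 ≤ j) (hjN : j < N)
    (hr : 0 ≤ r) (hrN : r < N) :
    (j = (i + r + 1) % N) ↔ (j - i - 1) % N = r := by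
  constructor
  · intro h
    subst h
    rw [sub_sub, pvSubEmod]
    have h2 : i + r + 1 - (i + 1) = r := by ring
    rw [h2, Int.emod_eq_of_lt hr hrN]
  · intro h
    have h1 : (i + r + 1) % N = ((j - i - 1) % N + (i + 1)) % N := by
      rw [h]; ring_nf
    rw [pvAddEmod] at h1
    have h2 : j - i - 1 + (i + 1) = j := by ring
    rw [h2, Int.emod_eq_of_lt hj hjN] at h1
    omega

-- core step equation
theorem pvCore (N i m j base : Int) (hN : 0 < N) (_hi : 0 ≤ i) (_hiN : i < N)
    (hj : 0 ≤ j) (hjN : j < N) (_hm : 0 ≤ m) :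
    base + (m + 1) / N + (if (j - i - 1) % N < (m + 1) % N then (1:Int) else 0)
    = (base + m / N + (if (j - i - 1) % N < m % N then (1:Int) else 0))
      + (if j = (i + m + 1) % N then (1:Int) else 0) := by
  set d := (j - i - 1) % N with hd
  have hd0 : 0 ≤ d := Int.emod_nonneg _ (by omega)
  have hdN : d < N := Int.emod_lt_of_pos _ hN
  set r := m % N with hr
  set q := m / N with hq
  have hr0 : 0 ≤ r := Int.emod_nonneg _ (by omega)
  have hrN : r < N := Int.emod_lt_of_pos _ hN
  have hm' : m = N * q + r := by rw [hq, hr]; exact (Int.ediv_add_emod m N).symm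
  have hbump : (j = (i + m + 1) % N) ↔ d = r := by
    have e1 : (i + m + 1) % N = (i + r + 1) % N := by
      have : i + m + 1 = i + r + 1 + N * q := by omega
      rw [this, Int.add_mul_emod_self_left]
    rw [e1]
    exact pvBumpIff N i r j hN hj hjN hr0 hrN
  simp only [hbump]
  rcases lt_or_eq_of_le (by omega : r + 1 ≤ N) with hc | hc
  · have e2 : m + 1 = r + 1 + N * q := by omega
    have hq' : (m + 1) / N = q := by
      rw [e2, Int.add_mul_ediv_left _ _ (by omega : N ≠ 0),
        Int.ediv_eq_zero_of_lt (by omega) (by omega), zero_add]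
    have hr' : (m + 1) % N = r + 1 := by
      rw [e2, Int.add_mul_emod_self_left, Int.emod_eq_of_lt (by omega) (by omega)]
    rw [hq', hr']
    split_ifs <;> omega
  · have hmul : N * (q + 1) = N * q + N := by ring
    have e2 : m + 1 = 0 + N * (q + 1) := by omega
    have hq' : (m + 1) / N = q + 1 := by
      rw [e2, Int.add_mul_ediv_left _ _ (by omega : N ≠ 0), Int.zero_ediv, zero_add]
    have hr' : (m + 1) % N = 0 := by
      rw [e2, Int.add_mul_emod_self_left, Int.zero_emod]
    rw [hq', hr']
    split_ifs <;> omega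

theorem pvDistNat (b : List Int) (i : Nat) (hi : i < b.length) (m : Nat) :
    (PySem.List.pyRange 1 ((m:Int)+1) 1).foldl (pvBump i) (b.set i 0)
    = (PySem.List.pyRange 0 (b.length:Int) 1).map (fun j =>
        (if j = (i:Int) then 0 else PySem.List.pyGetD b j 0)
        + PySem.Int.floordiv (m:Int) (b.length:Int)
        + (if PySem.Int.mod (j - (i:Int) - 1) (b.length:Int) < PySem.Int.mod (m:Int) (b.length:Int)
           then 1 else 0)) := by
  have hN : (0:Int) < (b.length:Int) := by omega
  have hNlen : (PySem.List.pyRange 0 (b.length:Int) 1).length = b.length := by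
    rw [PySem.List.length_pyRange_one]; omega
  induction m with
  | zero =>
    rw [Nat.cast_zero, zero_add, PySem.List.pyRange_one_eq_nil (le_refl 1), List.foldl_nil]
    rw [PySem.Int.floordiv_eq_ediv_of_pos hN, PySem.Int.mod_eq_emod_of_pos hN,
      Int.zero_ediv, Int.zero_emod]
    apply List.ext_getElem
    · simp [hNlen]
    · intro t h1 h2
      rw [List.getElem_set, List.getElem_map, PySem.List.getElem_pyRange_one, zero_add]
      have hmodpos : ¬ (PySem.Int.mod ((t:Int) - (i:Int) - 1) (b.length:Int) < 0) := by
        rw [PySem.Int.mod_eq_emod_of_pos hN]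
        exact not_lt.mpr (Int.emod_nonneg _ (by omega))
      simp only [hmodpos, if_false, add_zero]
      have ht : t < b.length := by simpa using h1
      by_cases hti : i = t
      · subst hti; simp
      · have : ¬ ((t:Int) = (i:Int)) := by omega
        simp only [hti, if_false, this]
        rw [PySem.List.pyGetD_natCast, List.getD_eq_getElem _ _ ht]
  | succ k ih =>
    have hcast : ((k+1:Nat):Int) + 1 = ((k:Int)+1) + 1 := by push_cast; ring
    rw [hcast, PySem.List.pyRange_one_succ_right (by omega : (1:Int) ≤ (k:Int)+1),
      List.foldl_append, ih, List.foldl_cons, List.foldl_nil]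
    -- now: pvBump i (F k) (↑k+1) = F (k+1)
    set N : Int := (b.length : Int) with hNdef
    set f : Int → Int → Int := fun (mm j : Int) =>
        (if j = (i:Int) then 0 else PySem.List.pyGetD b j 0)
        + PySem.Int.floordiv mm N
        + (if PySem.Int.mod (j - (i:Int) - 1) N < PySem.Int.mod mm N then 1 else 0) with hf
    show pvBump i ((PySem.List.pyRange 0 N 1).map (f (k:Int))) ((k:Int)+1)
        = (PySem.List.pyRange 0 N 1).map (f ((k+1:Nat):Int))
    have hlenmap : PySem.List.len ((PySem.List.pyRange 0 N 1).map (f (k:Int))) = N := by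
      rw [PySem.List.len_eq, List.length_map, hNlen]
    rw [pvBump]
    simp only [hlenmap]
    set K : Int := PySem.Int.mod ((i:Int) + ((k:Int)+1)) N with hK
    have hKe : K = ((i:Int) + (k:Int) + 1) % N := by
      rw [hK, PySem.Int.mod_eq_emod_of_pos hN]; ring_nf
    have hK0 : 0 ≤ K := by rw [hKe]; exact Int.emod_nonneg _ (by omega)
    have hKN : K < N := by rw [hKe]; exact Int.emod_lt_of_pos _ hN
    rw [PySem.List.pyGetD_map_pyRange_of_nonneg _ _ _ _ hK0 hKN,
      PySem.List.pySetD_of_nonneg _ _ hK0]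
    apply List.ext_getElem
    · simp [hNlen]
    · intro t h1 h2
      simp only [List.getElem_set, List.getElem_map, PySem.List.getElem_pyRange_one, zero_add]
      have ht : t < b.length := by simpa [hNlen] using h2
      have hstep : f ((k+1:Nat):Int) (t:Int)
          = f (k:Int) (t:Int) + (if (t:Int) = K then 1 else 0) := by
        rw [hf]
        simp only [PySem.Int.floordiv_eq_ediv_of_pos hN, PySem.Int.mod_eq_emod_of_pos hN]
        push_cast
        rw [hKe]
        exact pvCore N (i:Int) (k:Int) (t:Int) _ hN (by omega) (by omega)
          (by omega) (by omega) (by omega)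
      by_cases hKt : K.toNat = t
      · have htK : (t:Int) = K := by omega
        rw [if_pos hKt, hstep, if_pos htK, htK]
      · have htK : ¬ ((t:Int) = K) := by omega
        rw [if_neg hKt, hstep, if_neg htK, add_zero]

theorem pvDist (b : List Int) (i : Nat) (hi : i < b.length) (c : Int) :
    (PySem.List.pyRange 1 (c+1) 1).foldl (pvBump i) (b.set i 0)
    = (PySem.List.pyRange 0 (b.length:Int) 1).map (fun j =>
        (if j = (i:Int) then 0 else PySem.List.pyGetD b j 0)
        + PySem.Int.floordiv (max c 0) (b.length:Int)
        + (if PySem.Int.mod (j - (i:Int) - 1) (b.length:Int)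
             < PySem.Int.mod (max c 0) (b.length:Int) then 1 else 0)) := by
  by_cases hc : c ≤ 0
  · rw [max_eq_right hc]
    have h00 := pvDistNat b i hi 0
    simp only [Nat.cast_zero, zero_add, PySem.List.pyRange_one_eq_nil (le_refl (1:Int)),
      List.foldl_nil] at h00
    rw [PySem.List.pyRange_one_eq_nil (by omega : c + 1 ≤ 1), List.foldl_nil]
    exact h00
  · have hcpos : 0 ≤ c := by omega
    rw [max_eq_left hcpos]
    have hc' : c = ((c.toNat : Nat) : Int) := (Int.toNat_of_nonneg hcpos).symm
    rw [hc']
    exact pvDistNat b i hi c.toNat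

theorem pvExtGetD (xs ys : List Int) (hlen : xs.length = ys.length)
    (h : ∀ t : Nat, t < xs.length → PySem.List.pyGetD xs (t:Int) 0 = PySem.List.pyGetD ys (t:Int) 0) :
    xs = ys := by
  apply List.ext_getElem hlen
  intro t h1 h2
  have ht := h t h1
  rw [PySem.List.pyGetD_eq_getElem xs 0 (by omega) (by omega),
    PySem.List.pyGetD_eq_getElem ys 0 (by omega) (by omega)] at ht
  simpa using ht

theorem pvIncRun (c a : Int) (ha : 0 ≤ a) (k : Nat) (s : List Int)
    (hk : a + (k:Int) ≤ (s.length:Int)) :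
    (((PySem.List.pyRange a (a + (k:Int)) 1).foldl
        (fun s2 j => PySem.List.pySetD s2 j (PySem.List.pyGetD s2 j 0 + c)) s).length = s.length)
    ∧ ∀ (t : Nat), t < s.length →
      PySem.List.pyGetD ((PySem.List.pyRange a (a + (k:Int)) 1).foldl
        (fun s2 j => PySem.List.pySetD s2 j (PySem.List.pyGetD s2 j 0 + c)) s) (t:Int) 0
      = PySem.List.pyGetD s (t:Int) 0
        + (if a ≤ (t:Int) ∧ (t:Int) < a + (k:Int) then c else 0) := by
  induction k with
  | zero =>
    simp only [Nat.cast_zero, add_zero, PySem.List.pyRange_one_eq_nil (le_refl a), List.foldl_nil]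
    refine ⟨by trivial, ?_⟩
    intro t ht
    have hno : ¬ (a ≤ (t:Int) ∧ (t:Int) < a) := by omega
    rw [if_neg hno, add_zero]
  | succ kk ih =>
    obtain ⟨ihlen, ihval⟩ := ih (by push_cast at hk ⊢; omega)
    have hsucc : a + ((kk+1:Nat):Int) = (a + (kk:Int)) + 1 := by push_cast; ring
    rw [hsucc, PySem.List.pyRange_one_succ_right (by omega : a ≤ a + (kk:Int)),
      List.foldl_append, List.foldl_cons, List.foldl_nil]
    set R := (PySem.List.pyRange a (a + (kk:Int)) 1).foldl
        (fun s2 j => PySem.List.pySetD s2 j (PySem.List.pyGetD s2 j 0 + c)) s with hR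
    set t0 : Nat := (a + (kk:Int)).toNat with ht0
    have hidx : a + (kk:Int) = ((t0 : Nat) : Int) := (Int.toNat_of_nonneg (by omega)).symm
    have hconv : PySem.List.pySetD R (a + (kk:Int)) (PySem.List.pyGetD R (a + (kk:Int)) 0 + c)
        = PySem.List.pySetD R ((t0 : Nat) : Int) (PySem.List.pyGetD R ((t0 : Nat) : Int) 0 + c) := by
      rw [← hidx]
    rw [hconv]
    have ht0len : t0 < R.length := by rw [ihlen]; push_cast at hk; omega
    constructor
    · rw [PySem.List.pySetD_natCast, List.length_set, ihlen]
    · intro t ht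
      rw [PySem.List.pyGetD_pySetD_natCast _ _ t _ _ ht0len]
      by_cases hteq : t = t0
      · rw [if_pos hteq, ihval t0 (by omega)]
        rw [if_neg (by omega : ¬ (a ≤ ((t0:Nat):Int) ∧ ((t0:Nat):Int) < a + (kk:Int))), add_zero,
          hteq, if_pos (by omega : a ≤ ((t0:Nat):Int) ∧ ((t0:Nat):Int) < a + (kk:Int) + 1)]
      · rw [if_neg hteq, ihval t ht]
        by_cases h2 : a ≤ (t:Int) ∧ (t:Int) < a + (kk:Int)
        · rw [if_pos h2, if_pos (by omega : a ≤ (t:Int) ∧ (t:Int) < a + (kk:Int) + 1)]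
        · rw [if_neg h2, if_neg (by omega : ¬ (a ≤ (t:Int) ∧ (t:Int) < a + (kk:Int) + 1))]

-- wrapper for an arbitrary upper bound
theorem pvIncRun' (c a e : Int) (ha : 0 ≤ a) (hae : a ≤ e) (s : List Int)
    (he : e ≤ (s.length:Int)) :
    (((PySem.List.pyRange a e 1).foldl
        (fun s2 j => PySem.List.pySetD s2 j (PySem.List.pyGetD s2 j 0 + c)) s).length = s.length)
    ∧ ∀ (t : Nat), t < s.length →
      PySem.List.pyGetD ((PySem.List.pyRange a e 1).foldl
        (fun s2 j => PySem.List.pySetD s2 j (PySem.List.pyGetD s2 j 0 + c)) s) (t:Int) 0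
      = PySem.List.pyGetD s (t:Int) 0 + (if a ≤ (t:Int) ∧ (t:Int) < e then c else 0) := by
  have he' : e = a + (((e - a).toNat : Nat) : Int) := by omega
  rw [he']
  exact pvIncRun c a ha (e - a).toNat s (by omega)

theorem pvStep_eq (b : List Int) (hb : b ≠ []) : pvStepA b = pvStepB b := by
  have hlen : 0 < b.length := List.length_pos_iff.mpr hb
  have hN : (0:Int) < (b.length:Int) := by omega
  obtain ⟨mxv, hmx⟩ : ∃ m, PySem.List.max? b (fun x => x) = some m := by
    cases h : PySem.List.max? b (fun x => x) with
    | none => exact absurd ((PySem.List.max?_eq_none_iff b _).mp h) hb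
    | some m => exact ⟨m, rfl⟩
  obtain ⟨iA, hiA⟩ : ∃ k, PySem.List.index? b mxv = some k :=
    Option.isSome_iff_exists.mp
      ((PySem.List.index?_isSome_iff b mxv).mpr (PySem.List.max?_mem hmx))
  obtain ⟨hk, hbk, hfirst⟩ := PySem.List.getElem_of_index?_eq_some hiA
  have hgA : PySem.List.pyGetD b ((iA : Nat) : Int) 0 = mxv := by
    rw [PySem.List.pyGetD_eq_getElem b 0 (by omega) (by exact_mod_cast hk)]
    simpa using hbk
  simp only [pvStepA, pvStepB, hmx, hiA, Option.getD_some, PySem.List.len_eq,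
    PySem.List.pySetD_natCast, hgA]
  rw [pvDist b iA hk mxv]
  -- now: the closed-form map equals B's run-increment chain
  set N : Int := (b.length : Int) with hNdef
  by_cases hpos : mxv > 0
  · rw [if_pos hpos, max_eq_left hpos.le]
    set q := PySem.Int.floordiv mxv N with hq
    set r := PySem.Int.mod mxv N with hr
    have hre : r = mxv % N := by rw [hr, PySem.Int.mod_eq_emod_of_pos hN]
    have hr0 : 0 ≤ r := by rw [hre]; exact Int.emod_nonneg _ (by omega)
    have hrN : r < N := by rw [hre]; exact Int.emod_lt_of_pos _ hN
    set sp := min ((iA : Int) + 1 + r) N with hsp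
    have hiAN : ((iA : Nat) : Int) < N := by rw [hNdef]; exact_mod_cast hk
    have hsp1 : (iA : Int) + 1 ≤ sp := by omega
    have hspN : sp ≤ N := by omega
    have hrest0 : 0 ≤ r - (sp - (iA : Int) - 1) := by omega
    -- s0
    have hs0len : (b.set iA 0).length = b.length := by rw [List.length_set]
    -- s1 (both branches add q pointwise)
    obtain ⟨h1len, h1val⟩ := pvIncRun' q 0 N (le_refl 0) (by omega) (b.set iA 0) (by omega)
    set s1 := if q ≠ 0 then
        (PySem.List.pyRange 0 N 1).foldl
          (fun s2 j => PySem.List.pySetD s2 j (PySem.List.pyGetD s2 j 0 + q)) (b.set iA 0)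
      else b.set iA 0 with hs1
    have hs1len : s1.length = b.length := by
      rw [hs1]; split
      · rw [hs0len] at h1len; exact h1len
      · exact hs0len
    have hs1val : ∀ (t : Nat), t < b.length →
        PySem.List.pyGetD s1 (t:Int) 0 = PySem.List.pyGetD (b.set iA 0) (t:Int) 0 + q := by
      intro t ht
      rw [hs1]; split
      · rw [h1val t (by omega), if_pos (by constructor <;> omega)]
      · rename_i hq0
        have : q = 0 := by omega
        rw [this, add_zero]
    -- s2
    obtain ⟨h2len, h2val⟩ := pvIncRun' 1 ((iA : Int) + 1) sp (by omega) hsp1 s1 (by omega)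
    set s2 := (PySem.List.pyRange ((iA : Int) + 1) sp 1).foldl
        (fun s2 j => PySem.List.pySetD s2 j (PySem.List.pyGetD s2 j 0 + 1)) s1 with hs2
    have hs2len : s2.length = b.length := by rw [hs2, h2len, hs1len]
    -- s3
    obtain ⟨h3len, h3val⟩ := pvIncRun' 1 0 (r - (sp - (iA : Int) - 1)) (le_refl 0) hrest0 s2
      (by omega)
    apply Eq.symm
    apply pvExtGetD
    · rw [h3len, hs2len]
      simp [hNdef, PySem.List.length_pyRange_one]
    · intro t ht
      have htb : t < b.length := by rw [h3len, hs2len] at ht; exact ht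
      rw [h3val t (by omega), h2val t (by omega), hs1val t htb]
      have hset : PySem.List.pyGetD (b.set iA 0) (t:Int) 0
          = if (t:Int) = (iA : Int) then 0 else PySem.List.pyGetD b (t:Int) 0 := by
        rw [← PySem.List.pySetD_natCast, PySem.List.pyGetD_pySetD_natCast _ _ t _ _ hk]
        by_cases h : t = iA
        · rw [if_pos h, if_pos (by omega : ((t:Nat):Int) = ((iA:Nat):Int))]
        · rw [if_neg h, if_neg (by omega : ¬ ((t:Nat):Int) = ((iA:Nat):Int))]
      rw [hset, PySem.List.pyGetD_map_pyRange_of_nonneg _ _ _ _ (by omega)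
        (by rw [hNdef]; exact_mod_cast htb)]
      -- arithmetic: the two runs together are the wrapped run of length r
      have hd : PySem.Int.mod ((t:Int) - (iA : Int) - 1) N
          = ((t:Int) - (iA : Int) - 1) % N := PySem.Int.mod_eq_emod_of_pos hN
      have htN : (t:Int) < N := by rw [hNdef]; exact_mod_cast htb
      by_cases hti : (iA : Int) < (t:Int)
      · have : ((t:Int) - (iA : Int) - 1) % N = (t:Int) - (iA : Int) - 1 :=
          Int.emod_eq_of_lt (by omega) (by omega)
        rw [hd, this]
        split_ifs <;> omega
      · have he1 : ((t:Int) - (iA : Int) - 1) % N = ((t:Int) - (iA : Int) - 1 + N * 1) % N := by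
          rw [Int.add_mul_emod_self_left]
        have he2 : ((t:Int) - (iA : Int) - 1 + N * 1) % N = (t:Int) - (iA : Int) - 1 + N :=
          by rw [mul_one]; exact Int.emod_eq_of_lt (by omega) (by omega)
        rw [hd, he1, he2]
        split_ifs <;> omega
  · rw [if_neg hpos]
    have h00 := pvDist b iA hk mxv
    -- reuse the c ≤ 0 evaluation of the closed form
    rw [PySem.List.pyRange_one_eq_nil (by omega : mxv + 1 ≤ 1), List.foldl_nil] at h00
    exact h00.symm

theorem pvStepA_length (b : List Int) : (pvStepA b).length = b.length := by
  have hfold : ∀ (l : List Int) (i : Nat) (init : List Int),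
      (l.foldl (pvBump i) init).length = init.length := by
    intro l
    induction l with
    | nil => intro i init; rfl
    | cons x xs ih =>
      intro i init
      rw [List.foldl_cons, ih]
      simp [pvBump, PySem.List.length_pySetD]
  simp only [pvStepA]
  rw [hfold]
  simp

theorem pvLoop_eq (fuel : Nat) (b : List Int) (hb : b ≠ []) (sc : Int)
    (seen : PySem.Dict (List Int) Int) :
    pvLoopA fuel b sc seen = pvLoopB fuel b sc seen := by
  induction fuel generalizing b sc seen with
  | zero => rfl
  | succ f ih =>
    have hlen : (pvStepA b).length = b.length := pvStepA_length b
    have hne : pvStepA b ≠ [] := by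
      intro h; apply hb
      rw [h] at hlen; exact List.eq_nil_of_length_eq_zero hlen.symm
    simp only [pvLoopA, pvLoopB, pvStep_eq b hb]
    cases (seen.get? (pvStepB b)) with
    | some prev => rfl
    | none => exact ih _ (pvStep_eq b hb ▸ hne) _ _

-- ===== VERDICT (by name: the statement is the Claim_ definition above) =====
theorem redistributeBlocks_spec : Claim_equal_redistributeBlocks := by
  intro blocks _ hpre
  unfold Spec_redistributeBlocks redistributeBlocks redistributeBlocks_alt
  exact pvLoop_eq _ blocks hpre _ _
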